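-- pv_equiv track=rewrite | github.com/Shreyas70773/system-design-graph-rag-reasoning-image-resource-management-software | backend/app/scraping/website_scraper.py | determine_overall_style
-- ===== SOURCE A (Python) =====
-- from typing import Dict, Any, Optional, List
--
-- def determine_overall_style(keywords: List[str]) -> str:
--     """Determine primary style from keywords"""
--     if not keywords:
--         return "professional"
--
--     # Priority order
--     priority = ['minimal', 'elegant', 'bold', 'playful', 'modern', 'professional']
--
--     for style in priority:
--         if style in keywords:
--             return style
--
--     return keywords[0]
-- ===== SOURCE B (Python) =====
-- def determine_overall_style(keywords):
--     """Determine primary style from keywords"""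
--     if not keywords:
--         return "professional"
--     rank = {style: i for i, style in
--             enumerate(['minimal', 'elegant', 'bold', 'playful', 'modern', 'professional'])}
--     best = None
--     best_rank = None
--     for kw in keywords:
--         r = rank.get(kw)
--         if r is not None and (best_rank is None or r < best_rank):
--             best = kw
--             best_rank = r
--     return best if best is not None else keywords[0]
-- ===== Notes on version B (the rewrite author's own statement) =====
-- stated objective: idiomatic
-- what changed: B builds a style->rank index once and makes a single pass over the keywords keeping the minimum-rank hit (strict-less so earliest priority wins), instead of scanning the fixed priority list and testing membership of each style in the keyword list.
import Mathlib
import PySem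

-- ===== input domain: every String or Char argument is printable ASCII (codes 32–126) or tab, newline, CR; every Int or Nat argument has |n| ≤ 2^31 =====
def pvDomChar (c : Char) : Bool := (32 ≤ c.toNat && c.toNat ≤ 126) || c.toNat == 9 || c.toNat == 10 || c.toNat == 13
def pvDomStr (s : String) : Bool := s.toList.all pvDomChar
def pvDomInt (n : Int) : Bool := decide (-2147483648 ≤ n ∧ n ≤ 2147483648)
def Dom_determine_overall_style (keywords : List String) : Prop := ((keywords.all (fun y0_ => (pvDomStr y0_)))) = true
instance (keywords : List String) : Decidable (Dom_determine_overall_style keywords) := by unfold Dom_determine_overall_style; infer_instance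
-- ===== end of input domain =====

-- B replaces A's scan of the fixed priority list (membership test per style) by a rank
-- index and one pass over the keywords keeping the minimum-rank hit (objective: idiomatic).

-- ===== PORT A =====
-- the 'for style in priority: if style in keywords: return style' loop
def pvAScan : List String → List String → Option String
  | [], _ => none
  | s :: rest, ks => if ks.contains s then some s else pvAScan rest ks

def determine_overall_style (keywords : List String) : String :=
  if keywords = [] then "professional"
  else
    match pvAScan ["minimal", "elegant", "bold", "playful", "modern", "professional"] keywords with
    | some s => s
    | none => keywords.headD ""   -- keywords[0]; the guard ensures keywords ≠ []

-- ===== PORT B =====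
-- rank = {style: i for i, style in enumerate(priority)}
def pvRankDict : PySem.Dict String Int :=
  (PySem.List.enumerate ["minimal", "elegant", "bold", "playful", "modern", "professional"]).foldl
    (fun d p => d.insert p.2 p.1) PySem.Dict.empty

-- the 'for kw in keywords: r = rank.get(kw); …' loop; state = (best, best_rank), fused into one Option
def pvBLoop : List String → Option (String × Int) → Option (String × Int)
  | [], st => st
  | kw :: rest, st =>
      let st' :=
        match PySem.Dict.get? pvRankDict kw with
        | none => st
        | some r =>
            match st with
            | none => some (kw, r)
            | some (_, br) => if r < br then some (kw, r) else st
      pvBLoop rest st'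

def determine_overall_style_alt (keywords : List String) : String :=
  if keywords = [] then "professional"
  else
    match pvBLoop keywords none with
    | some (kw, _) => kw
    | none => keywords.headD ""   -- keywords[0]; the guard ensures keywords ≠ []

-- ===== PRECONDITION & SPEC =====
def Spec_determine_overall_style (keywords : List String) (out : String) : Prop := out = determine_overall_style_alt keywords
instance (keywords : List String) (out : String) : Decidable (Spec_determine_overall_style keywords out) := by unfold Spec_determine_overall_style; infer_instance

-- ===== CLAIM (what is proved, stated in full; the proofs are below) =====
def Claim_equal_determine_overall_style : Prop := ∀ (keywords : List String), Dom_determine_overall_style keywords → Spec_determine_overall_style keywords (determine_overall_style keywords)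

-- ===== LEMMAS AND PROOFS =====

-- closed form of rank.get(kw)
def rankOf (kw : String) : Option Int :=
  if kw = "minimal" then some 0
  else if kw = "elegant" then some 1
  else if kw = "bold" then some 2
  else if kw = "playful" then some 3
  else if kw = "modern" then some 4
  else if kw = "professional" then some 5
  else none

-- name of a rank (inverse of rankOf on its range)
def nameOf (r : Int) : String :=
  if r = 0 then "minimal"
  else if r = 1 then "elegant"
  else if r = 2 then "bold"
  else if r = 3 then "playful"
  else if r = 4 then "modern"
  else "professional"

lemma rankDict_eq : pvRankDict = PySem.Dict.mk
    [("minimal", 0), ("elegant", 1), ("bold", 2), ("playful", 3), ("modern", 4), ("professional", 5)] := by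
  decide

lemma rank_get_eq (kw : String) : PySem.Dict.get? pvRankDict kw = rankOf kw := by
  rw [rankDict_eq]
  by_cases h1 : kw = "minimal" <;> by_cases h2 : kw = "elegant" <;> by_cases h3 : kw = "bold" <;>
    by_cases h4 : kw = "playful" <;> by_cases h5 : kw = "modern" <;> by_cases h6 : kw = "professional" <;>
    simp [rankOf, PySem.Dict.get?_mk_cons, PySem.Dict.get?, h1, h2, h3, h4, h5, h6] <;>
    exact ⟨fun e => h1 e.symm, fun e => h2 e.symm, fun e => h3 e.symm,
           fun e => h4 e.symm, fun e => h5 e.symm, fun e => h6 e.symm⟩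

lemma name_of_rank {kw : String} {r : Int} (h : rankOf kw = some r) : kw = nameOf r := by
  unfold rankOf at h
  split_ifs at h with h1 h2 h3 h4 h5 h6 <;>
    simp only [Option.some.injEq, reduceCtorEq] at h <;>
    (subst h; simp_all [nameOf])

-- min-rank accumulator over Option Int (none = no hit yet)
def stepR (acc : Option Int) (kw : String) : Option Int :=
  match rankOf kw with
  | none => acc
  | some r =>
      match acc with
      | none => some r
      | some br => if r < br then some r else acc

def bestOf (ks : List String) : Option Int := ks.foldl stepR none

lemma stepR_eq_none {kw : String} (h : rankOf kw = none) (acc : Option Int) : stepR acc kw = acc := by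
  simp [stepR, h]

lemma stepR_some_none {kw : String} {r : Int} (h : rankOf kw = some r) :
    stepR none kw = some r := by
  simp [stepR, h]

lemma stepR_some_some {kw : String} {r a : Int} (h : rankOf kw = some r) :
    stepR (some a) kw = if r < a then some r else some a := by
  simp [stepR, h]

lemma bLoop_eq_fold (ks : List String) : ∀ (acc : Option Int),
    pvBLoop ks (acc.map (fun r => (nameOf r, r))) = (ks.foldl stepR acc).map (fun r => (nameOf r, r)) := by
  induction ks with
  | nil => intro acc; simp [pvBLoop]
  | cons kw rest ih =>
      intro acc
      simp only [pvBLoop, List.foldl, rank_get_eq]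
      rcases h : rankOf kw with _ | r
      · simp only [h]
        rw [stepR_eq_none h]
        exact ih acc
      · have hkw := name_of_rank h
        simp only [h]
        cases acc with
        | none =>
            rw [stepR_some_none h]
            simpa [hkw] using ih (some r)
        | some br =>
            rw [stepR_some_some h]
            by_cases hlt : r < br
            · simpa [hlt, hkw] using ih (some r)
            · simpa [hlt, hkw] using ih (some br)

-- first present priority index (A's scan, in rank form)
def firstIdx (ks : List String) : Option Int :=
  if ks.contains "minimal" then some 0
  else if ks.contains "elegant" then some 1
  else if ks.contains "bold" then some 2
  else if ks.contains "playful" then some 3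
  else if ks.contains "modern" then some 4
  else if ks.contains "professional" then some 5
  else none

lemma ascan_eq (ks : List String) :
    pvAScan ["minimal", "elegant", "bold", "playful", "modern", "professional"] ks
      = (firstIdx ks).map nameOf := by
  simp only [pvAScan, firstIdx]
  split_ifs <;> simp [nameOf]

-- option-min with ties to the left
def mergeR : Option Int → Option Int → Option Int
  | none, b => b
  | some a, none => some a
  | some a, some b => if b < a then some b else some a

lemma foldl_some (ks : List String) : ∀ (a : Int),
    ks.foldl stepR (some a) = mergeR (some a) (ks.foldl stepR none) := by
  induction ks with
  | nil => intro a; rfl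
  | cons kw rest ih =>
      intro a
      simp only [List.foldl]
      rcases h : rankOf kw with _ | r
      · rw [stepR_eq_none h, stepR_eq_none h]
        exact ih a
      · rw [stepR_some_some h, stepR_some_none h]
        by_cases hra : r < a
        · rw [if_pos hra, ih r]
          cases hX : rest.foldl stepR none with
          | none => simp [mergeR, hra]
          | some b => simp only [mergeR]; split_ifs <;> simp <;> omega
        · rw [if_neg hra, ih a, ih r]
          cases hX : rest.foldl stepR none with
          | none => simp [mergeR, hra]
          | some b => simp only [mergeR]; split_ifs <;> simp <;> omega

lemma bestOf_cons (kw : String) (ks : List String) :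
    bestOf (kw :: ks) = mergeR (rankOf kw) (bestOf ks) := by
  simp only [bestOf, List.foldl]
  rcases h : rankOf kw with _ | r
  · rw [stepR_eq_none h]; rfl
  · rw [stepR_some_none h]
    exact foldl_some ks r

lemma bestOf_eq_firstIdx (ks : List String) : bestOf ks = firstIdx ks := by
  induction ks with
  | nil => simp [bestOf, firstIdx, List.foldl]
  | cons kw rest ih =>
      rw [bestOf_cons, ih]
      rcases h : rankOf kw with _ | r
      · unfold rankOf at h
        split_ifs at h with h1 h2 h3 h4 h5 h6
        have e1 : ("minimal" == kw) = false := beq_eq_false_iff_ne.mpr (fun e => h1 e.symm)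
        have e2 : ("elegant" == kw) = false := beq_eq_false_iff_ne.mpr (fun e => h2 e.symm)
        have e3 : ("bold" == kw) = false := beq_eq_false_iff_ne.mpr (fun e => h3 e.symm)
        have e4 : ("playful" == kw) = false := beq_eq_false_iff_ne.mpr (fun e => h4 e.symm)
        have e5 : ("modern" == kw) = false := beq_eq_false_iff_ne.mpr (fun e => h5 e.symm)
        have e6 : ("professional" == kw) = false := beq_eq_false_iff_ne.mpr (fun e => h6 e.symm)
        simp only [firstIdx, List.contains_cons, e1, e2, e3, e4, e5, e6, Bool.false_or]
        cases firstIdx rest <;> simp [mergeR]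
      · unfold rankOf at h
        split_ifs at h with h1 h2 h3 h4 h5 h6 <;>
          simp only [Option.some.injEq, reduceCtorEq] at h <;> subst h <;> subst_vars <;>
          (by_cases m0 : "minimal" ∈ rest <;> by_cases m1 : "elegant" ∈ rest <;>
           by_cases m2 : "bold" ∈ rest <;> by_cases m3 : "playful" ∈ rest <;>
           by_cases m4 : "modern" ∈ rest <;> by_cases m5 : "professional" ∈ rest <;>
           simp [firstIdx, List.contains_cons, mergeR, m0, m1, m2, m3, m4, m5])

-- ===== VERDICT (by name: the statement is the Claim_ definition above) =====
theorem determine_overall_style_spec : Claim_equal_determine_overall_style := by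
  intro keywords _
  unfold Spec_determine_overall_style determine_overall_style determine_overall_style_alt
  by_cases h : keywords = []
  · rw [if_pos h, if_pos h]
  · rw [if_neg h, if_neg h]
    have hB : pvBLoop keywords none = (bestOf keywords).map (fun r => (nameOf r, r)) := by
      simpa using bLoop_eq_fold keywords none
    rw [ascan_eq, hB, bestOf_eq_firstIdx]
    cases firstIdx keywords <;> rfl
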